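-- pv_equiv track=rewrite | github.com/zachng1/cutup | cut up.py | stringsplit
-- ===== SOURCE A (Python) =====
-- def stringsplit(stringlist):    #convert a list of strings to a list of lists of words
--     splitstrings = []
--     for i in stringlist:
--         splitstrings.append(i.split())
--     for i in splitstrings:
--         instindx = range(1, len(i), 200)
--         for j in instindx:
--             i.insert(j, '\n')
--     return splitstrings
-- ===== SOURCE B (Python) =====
-- def stringsplit(stringlist):    #convert a list of strings to a list of lists of words
--     result = []
--     for s in stringlist:
--         words = s.split()
--         out = []
--         breaks = iter(range(1, len(words), 200))
--         next_break = next(breaks, None)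
--         for w in words:
--             if len(out) == next_break:
--                 out.append('\n')
--                 next_break = next(breaks, None)
--             out.append(w)
--         result.append(out)
--     return result
-- ===== Notes on version B (the rewrite author's own statement) =====
-- stated objective: alternative
-- what changed: A splits each string and then repeatedly calls list.insert, each insert shifting the whole tail; B makes one pass over the words, appending a newline whenever the output has reached the next planned break position from the same range(1, len(words), 200).
import Mathlib
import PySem

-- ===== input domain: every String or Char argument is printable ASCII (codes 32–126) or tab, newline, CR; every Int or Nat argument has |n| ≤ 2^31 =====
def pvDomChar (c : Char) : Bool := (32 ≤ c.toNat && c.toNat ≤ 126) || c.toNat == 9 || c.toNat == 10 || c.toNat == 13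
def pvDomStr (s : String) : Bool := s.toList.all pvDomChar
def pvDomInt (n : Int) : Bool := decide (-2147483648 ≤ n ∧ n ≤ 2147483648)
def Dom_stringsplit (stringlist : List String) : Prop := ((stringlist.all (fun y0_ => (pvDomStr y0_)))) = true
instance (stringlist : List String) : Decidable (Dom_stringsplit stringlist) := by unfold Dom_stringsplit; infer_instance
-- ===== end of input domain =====

-- B replaces A's repeated list.insert (which rescans the list for every newline) with a
-- single pass over the words that appends a newline whenever the output has reached the
-- next planned break position (objective: alternative).

-- ===== PORT A =====
-- split strings, then for each word list insert '\n' at range(1, len, 200) in turn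
def stringsplit (stringlist : List String) : List (List String) :=
  let splitstrings : List (List String) :=
    stringlist.foldl (fun acc i => acc ++ [PySem.Str.split₀ i]) []
  splitstrings.map (fun i =>
    (PySem.List.pyRange 1 (i.length : Int) 200).foldl
      (fun i j => PySem.List.insert i j "\n") i)

-- ===== PORT B =====
-- one word processed per step: if the output length has reached the next planned break,
-- emit '\n' and move to the following break, then emit the word
def sbStep (st : List String × List Int) (w : String) : List String × List Int :=
  match st.2 with
  | b :: rest =>
      if (st.1.length : Int) = b then (st.1 ++ ["\n"] ++ [w], rest)
      else (st.1 ++ [w], b :: rest)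
  | [] => (st.1 ++ [w], [])

def stringsplit_alt (stringlist : List String) : List (List String) :=
  stringlist.foldl (fun result s =>
    let words := PySem.Str.split₀ s
    let final := words.foldl sbStep ([], PySem.List.pyRange 1 (words.length : Int) 200)
    result ++ [final.1]) []

-- ===== PRECONDITION & SPEC =====
def Spec_stringsplit (stringlist : List String) (out : List (List String)) : Prop := out = stringsplit_alt stringlist
instance (stringlist : List String) (out : List (List String)) : Decidable (Spec_stringsplit stringlist out) := by unfold Spec_stringsplit; infer_instance

-- ===== CLAIM (what is proved, stated in full; the proofs are below) =====
def Claim_equal_stringsplit : Prop := ∀ (stringlist : List String), Dom_stringsplit stringlist → Spec_stringsplit stringlist (stringsplit stringlist)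

-- ===== LEMMAS AND PROOFS =====

-- normal form of A's result on one word list: t rounds of '\n' plus a 199-word chunk
def pvChunks : Nat → List String → List String
  | 0, ws => ws
  | t + 1, ws => "\n" :: (ws.take 199 ++ pvChunks t (ws.drop 199))

-- normal form of B's mid-pass state: 198 words, '\n', the triggering word, recurse
def pvM : Nat → List String → List String
  | 0, ws => ws
  | t + 1, ws => ws.take 198 ++ "\n" :: ((ws.drop 198).take 1 ++ pvM t (ws.drop 199))

-- the two normal forms agree one word in
lemma pv_bridge (t : Nat) : ∀ xs : List String,
    pvChunks (t + 1) xs = "\n" :: (xs.take 1 ++ pvM t (xs.drop 1)) := by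
  induction t with
  | zero =>
      intro xs
      show "\n" :: (xs.take 199 ++ pvChunks 0 (xs.drop 199)) = "\n" :: (xs.take 1 ++ pvM 0 (xs.drop 1))
      simp only [pvChunks, pvM]
      rw [List.take_append_drop, List.take_append_drop]
  | succ t ih =>
      intro xs
      show "\n" :: (xs.take 199 ++ pvChunks (t + 1) (xs.drop 199)) = _
      rw [ih]
      have h199 : (199 : Nat) = 1 + 198 := rfl
      calc "\n" :: (xs.take 199 ++ "\n" :: ((xs.drop 199).take 1 ++ pvM t ((xs.drop 199).drop 1)))
          = "\n" :: ((xs.take 1 ++ (xs.drop 1).take 198) ++ "\n" :: (((xs.drop 1).drop 198).take 1 ++ pvM t ((xs.drop 1).drop 199))) := by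
            rw [h199, List.take_add]
            simp [List.drop_drop]
        _ = "\n" :: (xs.take 1 ++ pvM (t + 1) (xs.drop 1)) := by
            simp [pvM]

-- Python list.insert clamps a nonnegative index to the length; take/drop clamp the same way
lemma pv_insert_total (xs : List String) (m : Nat) (v : String) :
    PySem.List.insert xs (m : Int) v = xs.take m ++ v :: xs.drop m := by
  simp only [PySem.List.insert, PySem.List.sliceIndices]
  have hK : ∀ (K : Nat), K = min m xs.length →
      List.take K xs ++ v :: List.drop K xs = List.take m xs ++ v :: List.drop m xs := by
    intro K hKm
    rcases Nat.le_total m xs.length with h | h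
    · rw [hKm, Nat.min_eq_left h]
    · rw [hKm, Nat.min_eq_right h, List.take_of_length_le h, List.take_of_length_le le_rfl,
          List.drop_eq_nil_of_le h, List.drop_eq_nil_of_le le_rfl]
  apply hK
  split_ifs <;> omega

-- inserting at (pre.length + p) leaves the prefix pre untouched
lemma pv_insert_shift (pre post : List String) (p : Nat) (v : String) :
    PySem.List.insert (pre ++ post) ((pre.length + p : Nat) : Int) v
      = pre ++ PySem.List.insert post ((p : Nat) : Int) v := by
  rw [pv_insert_total, pv_insert_total,
      List.take_append, List.drop_append]
  simp [List.take_of_length_le, List.drop_eq_nil_of_le]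

-- a whole insert loop whose indices all point past pre leaves pre untouched
lemma pv_foldl_insert_shift (l : List Nat) (g : Nat → Nat) (pre : List String) :
    ∀ post : List String,
      l.foldl (fun acc k => PySem.List.insert acc ((pre.length + g k : Nat) : Int) "\n") (pre ++ post)
        = pre ++ l.foldl (fun acc k => PySem.List.insert acc ((g k : Nat) : Int) "\n") post := by
  induction l with
  | nil => intro post; simp
  | cons a l ih =>
      intro post
      simp only [List.foldl_cons, pv_insert_shift]
      exact ih _

-- A's insert loop at indices 200*k equals the chunk normal form
lemma pv_loopA (t : Nat) : ∀ ws : List String, 199 * t ≤ ws.length + 199 →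
    (List.range t).foldl (fun acc k => PySem.List.insert acc ((200 * k : Nat) : Int) "\n") ws
      = pvChunks t ws := by
  induction t with
  | zero => intro ws _; simp [pvChunks]
  | succ t ih =>
      intro ws h
      rw [List.range_succ_eq_map]
      simp only [List.foldl_cons, List.foldl_map, Nat.mul_zero, Nat.cast_zero,
        PySem.List.insert_zero]
      rcases Nat.eq_zero_or_pos t with ht | ht
      · subst ht; simp [pvChunks]
      · have hlen : 199 ≤ ws.length := by omega
        have hsplit : ("\n" :: ws).take 200 ++ ("\n" :: ws).drop 200 = "\n" :: ws := List.take_append_drop _ _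
        have hpre : (("\n" :: ws).take 200).length = 200 := by
          simp [List.length_take]; omega
        calc (List.range t).foldl
              (fun acc k => PySem.List.insert acc ((200 * (k + 1) : Nat) : Int) "\n") ("\n" :: ws)
            = (List.range t).foldl
              (fun acc k => PySem.List.insert acc (((("\n" :: ws).take 200).length + 200 * k : Nat) : Int) "\n")
              (("\n" :: ws).take 200 ++ ("\n" :: ws).drop 200) := by
              rw [hsplit]; congr 1; funext acc k; rw [hpre]; congr 1; omega
          _ = ("\n" :: ws).take 200 ++ pvChunks t (("\n" :: ws).drop 200) := by
              rw [pv_foldl_insert_shift]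
              congr 1
              exact ih _ (by simp [List.length_drop]; omega)
          _ = pvChunks (t + 1) ws := by
              simp [pvChunks, List.take_succ_cons, List.drop_succ_cons]

-- B's pass while no break is reachable just appends the words
lemma sb_no_fire : ∀ (ws out : List String) (b : Int) (bs : List Int),
    ((out.length + ws.length : Nat) : Int) ≤ b →
    ws.foldl sbStep (out, b :: bs) = (out ++ ws, b :: bs) := by
  intro ws
  induction ws with
  | nil => intro out b bs _; simp
  | cons w ws ih =>
      intro out b bs h
      have hne : ¬ ((out.length : Int) = b) := by
        simp [List.length_cons] at h; omega
      simp only [List.foldl_cons, sbStep, hne, if_false]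
      rw [ih (out ++ [w]) b bs (by simp at h ⊢; omega)]
      simp

-- B's pass with no breaks left just appends the words
lemma sb_empty : ∀ (ws out : List String),
    ws.foldl sbStep (out, ([] : List Int)) = (out ++ ws, []) := by
  intro ws
  induction ws with
  | nil => intro out; simp
  | cons w ws ih =>
      intro out
      simp only [List.foldl_cons, sbStep]
      rw [ih (out ++ [w])]
      simp

-- B's pass up to and including the word that triggers the next break
lemma sb_fire (d : Nat) (ws out : List String) (bs : List Int) (h : d < ws.length) :
    ws.foldl sbStep (out, ((out.length + d : Nat) : Int) :: bs)
      = (ws.drop (d + 1)).foldl sbStep (out ++ ws.take d ++ ["\n"] ++ (ws.drop d).take 1, bs) := by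
  obtain ⟨x, rest, hx⟩ : ∃ x rest, ws.drop d = x :: rest := by
    cases hdrop : ws.drop d with
    | nil => exfalso; have := List.length_drop (l := ws) (i := d); rw [hdrop] at this; simp at this; omega
    | cons x rest => exact ⟨x, rest, rfl⟩
  have hws : ws = ws.take d ++ x :: rest := by rw [← hx, List.take_append_drop]
  have htlen : (ws.take d).length = d := by simp [List.length_take]; omega
  conv_lhs => rw [hws]
  rw [List.foldl_append,
      sb_no_fire (ws.take d) out _ bs (by rw [htlen])]
  simp only [List.foldl_cons, sbStep]
  rw [if_pos (by simp [htlen])]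
  have hrest : rest = ws.drop (d + 1) := by
    have := congrArg (List.drop 1) hx
    simpa [List.drop_drop, Nat.add_comm] using this.symm
  rw [hrest, hx]
  simp

-- B's pass from a chunk boundary equals the mid normal form
lemma sb_mid (t : Nat) : ∀ (ws out : List String), 199 * t ≤ ws.length →
    (ws.foldl sbStep (out, (List.range t).map (fun j => ((out.length + 198 + 200 * j : Nat) : Int)))).1
      = out ++ pvM t ws := by
  induction t with
  | zero => intro ws out _; simp [sb_empty, pvM]
  | succ t ih =>
      intro ws out h
      have h198 : 198 < ws.length := by omega
      rw [List.range_succ_eq_map]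
      simp only [List.map_cons, List.map_map]
      have hfire := sb_fire 198 ws (out) ((List.range t).map (fun j => ((out.length + 198 + 200 * (j + 1) : Nat) : Int))) h198
      simp only [Nat.mul_zero, Nat.add_zero] at hfire ⊢
      rw [show ((fun j => ((out.length + 198 + 200 * j : Nat) : Int)) ∘ Nat.succ)
            = fun j => ((out.length + 198 + 200 * (j + 1) : Nat) : Int) by funext j; simp [Nat.succ_eq_add_one]]
      rw [hfire]
      have hlen1 : ((ws.drop 198).take 1).length = 1 := by
        simp [List.length_take, List.length_drop]; omega
      have hout' : (out ++ ws.take 198 ++ ["\n"] ++ (ws.drop 198).take 1).length = out.length + 200 := by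
        simp [List.length_take]
        omega
      have hmap : (List.range t).map (fun j => ((out.length + 198 + 200 * (j + 1) : Nat) : Int))
          = (List.range t).map (fun j => (((out ++ ws.take 198 ++ ["\n"] ++ (ws.drop 198).take 1).length + 198 + 200 * j : Nat) : Int)) := by
        apply List.map_congr_left
        intro j _
        rw [hout']
        congr 1
        ring
      rw [hmap, ih (ws.drop 199) _ (by simp [List.length_drop]; omega)]
      simp [pvM]

-- both passes, n >= 2 case: A reaches w0 :: pvChunks, B reaches the mid normal form
lemma pv_perT (T' : Nat) (w0 : String) (tail : List String)
    (h200 : 200 * (T' + 1) ≤ (w0 :: tail).length + 198) :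
    List.foldl (fun i j => PySem.List.insert i j "\n") (w0 :: tail)
        ((List.range (T' + 1)).map (fun k : Nat => 1 + 200 * (k : Int)))
      = ((w0 :: tail).foldl sbStep
          ([], (List.range (T' + 1)).map (fun k : Nat => 1 + 200 * (k : Int)))).1 := by
  have hlen : (w0 :: tail).length = tail.length + 1 := rfl
  -- A's side
  have hA : List.foldl (fun i j => PySem.List.insert i j "\n") (w0 :: tail)
        ((List.range (T' + 1)).map (fun k : Nat => 1 + 200 * (k : Int)))
      = w0 :: pvChunks (T' + 1) tail := by
    rw [List.foldl_map]
    have hfun : (fun (acc : List String) (k : Nat) => PySem.List.insert acc (1 + 200 * (k : Int)) "\n")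
        = fun acc k => PySem.List.insert acc ((([w0] : List String).length + 200 * k : Nat) : Int) "\n" := by
      funext acc k; congr 1
    rw [hfun]
    have hstep := pv_foldl_insert_shift (List.range (T' + 1)) (fun k => 200 * k) [w0] tail
    have : (w0 :: tail : List String) = [w0] ++ tail := rfl
    rw [this, hstep, pv_loopA (T' + 1) tail (by omega)]
    rfl
  -- B's side
  have htl : 1 ≤ tail.length := by omega
  have hB : ((w0 :: tail).foldl sbStep
        ([], (List.range (T' + 1)).map (fun k : Nat => 1 + 200 * (k : Int)))).1
      = (w0 :: tail).take 1 ++ "\n" :: (((w0 :: tail).drop 1).take 1 ++ pvM T' ((w0 :: tail).drop 2)) := by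
    rw [List.range_succ_eq_map]
    simp only [List.map_cons, List.map_map, Nat.cast_zero, mul_zero, add_zero]
    have hfire := sb_fire 1 (w0 :: tail) []
      ((List.range T').map ((fun (k : Nat) => 1 + 200 * (k : Int)) ∘ Nat.succ)) (by simp; omega)
    simp only [List.length_nil, Nat.zero_add, Nat.cast_one] at hfire
    rw [hfire]
    have hout3 : (([] : List String) ++ (w0 :: tail).take 1 ++ ["\n"] ++ ((w0 :: tail).drop 1).take 1).length = 3 := by
      simp [List.length_take]; omega
    have hmap2 : (List.range T').map ((fun (k : Nat) => 1 + 200 * (k : Int)) ∘ Nat.succ)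
        = (List.range T').map (fun j =>
            (((([] : List String) ++ (w0 :: tail).take 1 ++ ["\n"] ++ ((w0 :: tail).drop 1).take 1).length + 198 + 200 * j : Nat) : Int)) := by
      apply List.map_congr_left
      intro j _
      rw [hout3]
      simp [Function.comp]
      ring
    have hd : List.drop (1 + 1) (w0 :: tail) = List.drop 2 (w0 :: tail) := rfl
    rw [hmap2, hd, sb_mid T' ((w0 :: tail).drop 2) _ (by simp; omega)]
    simp
  rw [hA, hB, pv_bridge T' tail]
  simp

-- per-string equality of the two bodies
lemma pv_perstring (ws : List String) :
    (PySem.List.pyRange 1 (ws.length : Int) 200).foldl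
        (fun i j => PySem.List.insert i j "\n") ws
      = (ws.foldl sbStep ([], PySem.List.pyRange 1 (ws.length : Int) 200)).1 := by
  rw [PySem.List.pyRange_of_pos 1 (ws.length : Int) (by norm_num)]
  by_cases hn : 2 ≤ ws.length
  · have hlt : (1 : Int) < (ws.length : Int) := by exact_mod_cast hn
    rw [if_pos hlt]
    have hTpos : 1 ≤ (((ws.length : Int) - 1 + 200 - 1) / 200).toNat := by
      omega
    obtain ⟨T', hT'⟩ : ∃ T', (((ws.length : Int) - 1 + 200 - 1) / 200).toNat = T' + 1 :=
      ⟨_, (Nat.succ_pred_eq_of_pos hTpos).symm⟩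
    have h200 : 200 * (T' + 1) ≤ ws.length + 198 := by
      omega
    obtain ⟨w0, tail, hws⟩ : ∃ w0 tail, ws = w0 :: tail := by
      cases ws with
      | nil => simp at hn
      | cons a l => exact ⟨a, l, rfl⟩
    rw [hT', hws]
    exact pv_perT T' w0 tail (by rw [← hws]; omega)
  · have hnot : ¬ ((1 : Int) < (ws.length : Int)) := by
      omega
    rw [if_neg hnot]
    simp [sb_empty]

-- ===== VERDICT (by name: the statement is the Claim_ definition above) =====
theorem stringsplit_spec : Claim_equal_stringsplit := by
  intro stringlist _
  unfold Spec_stringsplit stringsplit stringsplit_alt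
  rw [PySem.List.foldl_append_singleton_eq_map]
  rw [show (fun (result : List (List String)) s =>
        result ++ [(let words := PySem.Str.split₀ s
                    let final := words.foldl sbStep ([], PySem.List.pyRange 1 (words.length : Int) 200)
                    final.1)])
      = (fun result s => result ++ [((PySem.Str.split₀ s).foldl sbStep
            ([], PySem.List.pyRange 1 ((PySem.Str.split₀ s).length : Int) 200)).1]) from rfl]
  rw [PySem.List.foldl_append_singleton_eq_map]
  simp only [List.nil_append, List.map_map]
  exact List.map_congr_left (fun s _ => pv_perstring (PySem.Str.split₀ s))
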